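-- pv_equiv track=rewrite | github.com/XuanShine/autopython | PyWubook/main.py | sum_avail
-- ===== SOURCE A (Python) =====
-- REAL_ROOMS = {"329039", "329667", "329670", "407751", "469743", "469744"}
--
-- def sum_avail(avail, list_code=REAL_ROOMS):
--     """Total des disponibilités par jour des chambres dans list_code.
--     INPUT: {<date>: {<code_chambre>: <disponibilité, ...},
--             ... }
--         voir fonction get_avail(dfrom, dto)
--     RETURN {<date>: <total_disponibilité>, ...} <date>: dd/mm/yyyy"""
--     # TODO function can be test
--     result = dict()
--     for date, avail_day in avail.items():
--         total_avail_day = 0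
--         for room, avail in avail_day.items():
--             if room in list_code:
--                 total_avail_day += avail
--         result[date] = total_avail_day
--     return result
-- ===== SOURCE B (Python) =====
-- REAL_ROOMS = {"329039", "329667", "329670", "407751", "469743", "469744"}
--
-- def sum_avail(avail, list_code=REAL_ROOMS):
--     """Total des disponibilités par jour des chambres dans list_code."""
--     codes = set(list_code)
--     return {date: sum(day.get(code, 0) for code in codes)
--             for date, day in avail.items()}
-- ===== Notes on version B (the rewrite author's own statement) =====
-- stated objective: simpler
-- what changed: B builds the result in one dict comprehension, summing direct lookups day.get(code, 0) over the deduplicated selected codes, instead of A's scan over every room of each day with a membership filter and an accumulator.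
import Mathlib
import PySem

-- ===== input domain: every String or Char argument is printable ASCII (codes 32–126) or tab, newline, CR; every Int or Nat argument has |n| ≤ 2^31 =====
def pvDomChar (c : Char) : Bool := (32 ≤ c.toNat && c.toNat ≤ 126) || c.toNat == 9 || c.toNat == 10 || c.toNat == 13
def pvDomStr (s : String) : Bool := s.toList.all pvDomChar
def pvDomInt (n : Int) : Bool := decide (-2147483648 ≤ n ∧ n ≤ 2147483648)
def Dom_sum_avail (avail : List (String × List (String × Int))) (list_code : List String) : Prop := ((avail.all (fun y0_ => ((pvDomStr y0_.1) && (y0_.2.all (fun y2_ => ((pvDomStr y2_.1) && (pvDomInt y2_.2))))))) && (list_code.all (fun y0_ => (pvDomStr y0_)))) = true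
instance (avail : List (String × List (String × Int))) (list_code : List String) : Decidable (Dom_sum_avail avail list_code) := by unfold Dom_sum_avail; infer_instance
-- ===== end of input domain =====

-- B iterates over the deduplicated selected codes and sums dict lookups per date,
-- instead of A's scan over every room with a membership filter (objective: simpler).

-- ===== PORT A =====
def sum_avail (avail : List (String × List (String × Int))) (list_code : List String) : List (String × Int) :=
  (avail.foldl
    (fun result p =>
      result.insert p.1
        (p.2.foldl (fun total q => if list_code.contains q.1 then total + q.2 else total) 0))
    PySem.Dict.empty).items

-- ===== PORT B =====
def sum_avail_alt (avail : List (String × List (String × Int))) (list_code : List String) : List (String × Int) :=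
  let codes : PySem.Set String := PySem.Set.ofList list_code
  avail.map (fun p => (p.1, (codes.map (fun c => (PySem.Dict.mk p.2).getD c 0)).sum))

-- ===== PRECONDITION & SPEC =====
-- Both dict arguments come from Python dicts, whose keys are unique by construction;
-- Pre_ states exactly that (as assoc lists: date keys and each day's room keys have no duplicates).
def Pre_sum_avail (avail : List (String × List (String × Int))) (list_code : List String) : Prop :=
  (avail.map Prod.fst).Nodup ∧ ∀ p ∈ avail, (p.2.map Prod.fst).Nodup
instance (avail : List (String × List (String × Int))) (list_code : List String) : Decidable (Pre_sum_avail avail list_code) := by unfold Pre_sum_avail; infer_instance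

def pvWitness_sum_avail : (List (String × List (String × Int))) × List String :=
  ([("01/01/2024", [("329039", 2), ("999999", 5)]), ("02/01/2024", [("329039", 1)])], ["329039", "329667"])

def Spec_sum_avail (avail : List (String × List (String × Int))) (list_code : List String) (out : List (String × Int)) : Prop := out = sum_avail_alt avail list_code
instance (avail : List (String × List (String × Int))) (list_code : List String) (out : List (String × Int)) : Decidable (Spec_sum_avail avail list_code out) := by unfold Spec_sum_avail; infer_instance

-- ===== CLAIM (what is proved, stated in full; the proofs are below) =====
def Claim_equal_sum_avail : Prop := ∀ (avail : List (String × List (String × Int))) (list_code : List String), Dom_sum_avail avail list_code → Pre_sum_avail avail list_code → Spec_sum_avail avail list_code (sum_avail avail list_code)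

-- ===== LEMMAS AND PROOFS =====

-- A's inner loop is the sum of the filtered availabilities.
theorem aday_eq (lc : List String) (day : List (String × Int)) :
    day.foldl (fun total q => if lc.contains q.1 then total + q.2 else total) 0
      = (day.map (fun q => if q.1 ∈ lc then q.2 else 0)).sum := by
  have h : (fun (total : Int) (q : String × Int) => if lc.contains q.1 then total + q.2 else total)
      = (fun total q => total + if q.1 ∈ lc then q.2 else 0) := by
    funext t q
    by_cases h : q.1 ∈ lc <;> simp [h]
  rw [h, PySem.List.foldl_add]
  simp

-- Summing 'if c = r then v else g c' over a duplicate-free list, when g r = 0.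
theorem sum_map_ite (r : String) (v : Int) (g : String → Int) :
    ∀ (S : List String), S.Nodup → g r = 0 →
      (S.map (fun c => if c = r then v else g c)).sum
        = (if r ∈ S then v else 0) + (S.map g).sum := by
  intro S
  induction S with
  | nil => simp
  | cons s rest ih =>
    intro hnd hg
    rcases List.nodup_cons.mp hnd with ⟨hs, hrest⟩
    by_cases h : s = r
    · subst h
      have hmap : rest.map (fun c => if c = s then v else g c) = rest.map g := by
        apply List.map_congr_left
        intro c hc
        have : c ≠ s := fun hcs => hs (hcs ▸ hc)
        simp [this]
      simp [hmap, hg]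
    · have : r ∈ rest ∨ ¬ r ∈ rest := em _
      simp only [List.map_cons, List.sum_cons, if_neg h, List.mem_cons]
      rw [ih hrest hg]
      have hne : ¬ r = s := fun hrs => h hrs.symm
      by_cases hr : r ∈ rest <;> simp [hr, hne] <;> ring

-- B's per-day sum over the distinct codes equals A's filtered sum, given unique room keys.
theorem bday_eq (lc : List String) (day : List (String × Int))
    (hnd : (day.map Prod.fst).Nodup) :
    ((PySem.Set.ofList lc).map (fun c => (PySem.Dict.mk day).getD c 0)).sum
      = (day.map (fun q => if q.1 ∈ lc then q.2 else 0)).sum := by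
  induction day with
  | nil =>
    simp [PySem.Dict.getD_eq_get?_getD]
    apply List.sum_eq_zero
    intro x hx
    simp at hx
    rcases hx with ⟨c, _, hc⟩
    simpa [PySem.Dict.get?_mk_cons] using hc.symm
  | cons q rest ih =>
    obtain ⟨r, v⟩ := q
    simp only [List.map_cons] at hnd
    rcases List.nodup_cons.mp hnd with ⟨hr, hrest⟩
    have hmap : (PySem.Set.ofList lc).map (fun c => (PySem.Dict.mk ((r, v) :: rest)).getD c 0)
        = (PySem.Set.ofList lc).map (fun c => if c = r then v else (PySem.Dict.mk rest).getD c 0) := by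
      apply List.map_congr_left
      intro c _
      rw [PySem.Dict.getD_eq_get?_getD, PySem.Dict.get?_mk_cons]
      by_cases h : c = r
      · simp [h]
      · have : ¬ r = c := fun hrc => h hrc.symm
        simp [this, h, PySem.Dict.getD_eq_get?_getD]
    have hg0 : (PySem.Dict.mk rest).getD r 0 = 0 := by
      apply PySem.Dict.getD_of_get?_eq_none
      rw [PySem.Dict.get?_eq_none_iff_not_mem_keys]
      simpa using hr
    rw [hmap, sum_map_ite r v _ _ (PySem.Set.nodup_ofList lc) hg0, ih hrest]
    simp [PySem.Set.mem_ofList]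

-- ===== VERDICT (by name: the statement is the Claim_ definition above) =====
theorem sum_avail_spec : Claim_equal_sum_avail := by
  intro avail list_code _ hpre
  unfold Spec_sum_avail sum_avail sum_avail_alt
  rw [PySem.Dict.items_foldl_insert_fresh avail Prod.fst _ PySem.Dict.empty
        (by intro a _; exact PySem.Dict.contains_empty _) hpre.1]
  simp only [show (PySem.Dict.empty : PySem.Dict String Int).items = [] from rfl, List.nil_append]
  apply List.map_congr_left
  intro p hp
  rw [aday_eq, bday_eq list_code p.2 (hpre.2 p hp)]
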